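-- pv_equiv track=rewrite | github.com/canyon-trail/advent-of-code-2021 | python/day14.py | insert_polymer
-- ===== SOURCE A (Python) =====
-- import itertools
--
-- def merge_counts(a, b):
--     res = {}
--
--     for (k,v) in itertools.chain(a.items(), b.items()):
--         res[k] = res.get(k, 0) + v
--
--     return res
--
-- def insert_polymer(polymer, rules, count, memo = {}):
--     last = polymer[-1:]
--
--     counts = { last: 1 }
--     if count == 0:
--         for l in polymer[:-1]:
--             counts[l] = counts.get(l, 0) + 1
--         return counts
--
--     memo_key = (polymer, count)
--
--     memoized = memo.get(memo_key, None)
--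
--     if memoized is not None:
--         return memoized
--
--     for (left, right) in itertools.pairwise(polymer):
--         mid = rules.get(left + right, '')
--         if mid == '':
--             counts = merge_counts({ left: 1, right: 1 }, counts)
--             continue
--
--         sub_polymer_left = left + mid
--         sub_polymer_right = mid + right
--
--         sub_counts_left = insert_polymer(sub_polymer_left, rules, count - 1, memo)
--         sub_counts_right = insert_polymer(sub_polymer_right, rules, count - 1, memo)
--
--         counts = merge_counts(counts, merge_counts(sub_counts_left, { mid: -1 }))
--         counts = merge_counts(counts, merge_counts(sub_counts_right, { right: -1 }))
--
--
--     memo[memo_key] = counts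
--     return counts
-- ===== SOURCE B (Python) =====
-- # B: iterative bottom-up tabulation (level-by-level frontier DP) replacing A's
-- # memoized DFS recursion; return-value equivalent only (A mutates `memo`, B reads it).
-- def _merge(a, b):
--     res = {}
--     for d in (a, b):
--         for k, v in d.items():
--             res[k] = res.get(k, 0) + v
--     return res
--
-- def _letter_counts(p):
--     counts = {p[-1:]: 1}
--     for l in p[:-1]:
--         counts[l] = counts.get(l, 0) + 1
--     return counts
--
-- def _expand_once(p, rules, sub):
--     counts = {p[-1:]: 1}
--     for l, r in zip(p, p[1:]):
--         mid = rules.get(l + r, '')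
--         if mid == '':
--             counts = _merge({l: 1, r: 1}, counts)
--         else:
--             counts = _merge(counts, _merge(sub.get(l + mid, {}), {mid: -1}))
--             counts = _merge(counts, _merge(sub.get(mid + r, {}), {r: -1}))
--     return counts
--
-- def insert_polymer(polymer, rules, count, memo={}):
--     if count == 0:
--         return _letter_counts(polymer)
--     hit = memo.get((polymer, count))
--     if hit is not None:
--         return hit
--     # downward pass: which strings are needed at each level (count, count-1, ..)
--     frontiers = []
--     frontier = [polymer]
--     j = count
--     while j > 0 and frontier:
--         frontiers.append((j, frontier))
--         nxt = {}
--         for p in frontier: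
--             if memo.get((p, j)) is not None:
--                 continue
--             for l, r in zip(p, p[1:]):
--                 mid = rules.get(l + r, '')
--                 if mid != '':
--                     nxt[l + mid] = True
--                     nxt[mid + r] = True
--         frontier = list(nxt)
--         j -= 1
--     # upward pass: tabulate values level by level
--     vals = {p: _letter_counts(p) for p in frontier}
--     for j, fr in reversed(frontiers):
--         newvals = {}
--         for p in fr:
--             hit = memo.get((p, j))
--             newvals[p] = hit if hit is not None else _expand_once(p, rules, vals)
--         vals = newvals
--     return vals[polymer]
-- ===== Notes on version B (the rewrite author's own statement) =====
-- stated objective: alternative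
-- what changed: A's memoized depth-first recursion (with in-place memo mutation) is replaced by an iterative bottom-up tabulation: a downward pass collects the distinct sub-polymers needed at each expansion level, then an upward pass tabulates their count-dicts level by level; equivalence is about the return value only (A mutates memo, B only reads it).
-- outside the precondition, e.g. on insert_polymer('ab', {'ab': 'c'}, -1, {}): A returns {'b': 2, 'a': 1, 'c': 2}, B returns {'b': 1, 'a': 1}
import Mathlib
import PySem

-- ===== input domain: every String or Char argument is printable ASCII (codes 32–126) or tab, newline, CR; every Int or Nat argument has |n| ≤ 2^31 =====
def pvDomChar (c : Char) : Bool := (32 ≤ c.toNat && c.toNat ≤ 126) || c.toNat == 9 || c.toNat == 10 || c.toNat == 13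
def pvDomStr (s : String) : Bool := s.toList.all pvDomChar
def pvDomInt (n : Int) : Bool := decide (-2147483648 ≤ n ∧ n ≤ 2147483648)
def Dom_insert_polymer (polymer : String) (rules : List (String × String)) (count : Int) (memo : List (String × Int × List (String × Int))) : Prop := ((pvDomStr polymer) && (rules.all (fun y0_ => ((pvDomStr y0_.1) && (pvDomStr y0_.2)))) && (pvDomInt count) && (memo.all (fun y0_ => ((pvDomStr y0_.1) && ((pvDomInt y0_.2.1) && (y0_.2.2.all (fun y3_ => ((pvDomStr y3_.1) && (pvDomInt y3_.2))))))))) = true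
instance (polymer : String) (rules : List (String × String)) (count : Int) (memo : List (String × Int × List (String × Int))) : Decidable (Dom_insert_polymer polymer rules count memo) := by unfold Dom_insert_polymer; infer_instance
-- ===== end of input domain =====

-- B replaces A's memoized depth-first recursion by an iterative bottom-up level tabulation;
-- the equivalence proved here is about the RETURN VALUE only (Python A mutates `memo` in place, B only reads it).

-- shared helpers: both Python files contain this exact `merge_counts` dict-merging helper,
-- and both contain the memo lookup `memo.get((p, c))` (assoc list, first match) and `rules.get(k, '')`.
def mergeCounts (a b : PySem.Dict String Int) : PySem.Dict String Int :=
  (a.items ++ b.items).foldl (fun res kv => res.modify kv.1 0 (· + kv.2)) PySem.Dict.empty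

def memoGet (memo : List (String × Int × List (String × Int))) (p : String) (c : Int) :
    Option (List (String × Int)) :=
  match memo with
  | [] => none
  | e :: t => if e.1 = p ∧ e.2.1 = c then some e.2.2 else memoGet t p c

def rulesGet (rules : List (String × String)) (k : String) : String :=
  ((rules.lookup k).getD "")

-- `{polymer[-1:]: 1}` then `for l in polymer[:-1]: counts[l] = counts.get(l, 0) + 1`
def letterCounts (cs : List Char) : PySem.Dict String Int :=
  (PySem.List.slice cs none (some (-1))).foldl
    (fun d c => d.modify (String.ofList [c]) 0 (· + 1))
    ((PySem.Dict.empty).insert (String.ofList (PySem.List.slice cs (some (-1)) none)) 1)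

-- ===== PORT A =====
-- A's recursion, with the mutable memo threaded through as state; fuel = count.toNat
-- (each recursive call decreases count by 1 and recursion only happens at count > 0,
--  so the fuel-0 fallback is unreachable under Pre_).
mutual
def aGo (rules : List (String × String)) (fuel : Nat) (cs : List Char) (count : Int)
    (memo : List (String × Int × List (String × Int))) :
    PySem.Dict String Int × List (String × Int × List (String × Int)) :=
  let counts := (PySem.Dict.empty).insert (String.ofList (PySem.List.slice cs (some (-1)) none)) 1
  if count = 0 then
    ((PySem.List.slice cs none (some (-1))).foldl
      (fun d c => d.modify (String.ofList [c]) 0 (· + 1)) counts, memo)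
  else
    match memoGet memo (String.ofList cs) count with
    | some v => (PySem.Dict.mk v, memo)
    | none =>
      match fuel with
      | 0 => (counts, memo)  -- unreachable when 0 ≤ count (then count ≥ 1 ≤ fuel)
      | fuel' + 1 =>
        let st := aLoop rules fuel' count (cs.zip cs.tail) counts memo
        (st.1, st.2 ++ [(String.ofList cs, (count, st.1.items))])
termination_by (fuel, 0)

def aLoop (rules : List (String × String)) (fuel : Nat) (count : Int)
    (pairs : List (Char × Char)) (counts : PySem.Dict String Int)
    (memo : List (String × Int × List (String × Int))) :
    PySem.Dict String Int × List (String × Int × List (String × Int)) :=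
  match pairs with
  | [] => (counts, memo)
  | lr :: rest =>
    let mid := rulesGet rules (String.ofList [lr.1, lr.2])
    if mid = "" then
      aLoop rules fuel count rest
        (mergeCounts ((PySem.Dict.empty).insert (String.ofList [lr.1]) 1
                        |>.insert (String.ofList [lr.2]) 1) counts) memo
    else
      let sl := aGo rules fuel (lr.1 :: mid.toList) (count - 1) memo
      let sr := aGo rules fuel (mid.toList ++ [lr.2]) (count - 1) sl.2
      let counts := mergeCounts counts (mergeCounts sl.1 (PySem.Dict.mk [(mid, -1)]))
      let counts := mergeCounts counts (mergeCounts sr.1 (PySem.Dict.mk [(String.ofList [lr.2], -1)]))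
      aLoop rules fuel count rest counts sr.2
termination_by (fuel, pairs.length + 1)
end

def insert_polymer (polymer : String) (rules : List (String × String)) (count : Int)
    (memo : List (String × Int × List (String × Int))) : List (String × Int) :=
  (aGo rules count.toNat polymer.toList count memo).1.items

-- ===== PORT B =====
-- _expand_once(p, rules, sub): one level of expansion, sub-values read from `vals`
def bExpandOnce (rules : List (String × String)) (vals : PySem.Dict String (PySem.Dict String Int))
    (cs : List Char) : PySem.Dict String Int :=
  (cs.zip cs.tail).foldl
    (fun counts lr =>
      let mid := rulesGet rules (String.ofList [lr.1, lr.2])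
      if mid = "" then
        mergeCounts ((PySem.Dict.empty).insert (String.ofList [lr.1]) 1
                       |>.insert (String.ofList [lr.2]) 1) counts
      else
        let counts := mergeCounts counts
          (mergeCounts (vals.getD (String.ofList (lr.1 :: mid.toList)) PySem.Dict.empty)
            (PySem.Dict.mk [(mid, -1)]))
        mergeCounts counts
          (mergeCounts (vals.getD (String.ofList (mid.toList ++ [lr.2])) PySem.Dict.empty)
            (PySem.Dict.mk [(String.ofList [lr.2], -1)])))
    ((PySem.Dict.empty).insert (String.ofList (PySem.List.slice cs (some (-1)) none)) 1)

-- downward pass: `while j > 0 and frontier:` record (j, frontier), expand to the next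
-- level's distinct needed strings (`nxt` is an insertion-ordered set)
def bDown (rules : List (String × String)) (memo : List (String × Int × List (String × Int)))
    (fuel : Nat) (j : Int) (frontier : List String) (acc : List (Int × List String)) :
    List String × List (Int × List String) :=
  match fuel with
  | 0 => (frontier, acc)
  | fuel' + 1 =>
    if j > 0 ∧ frontier ≠ [] then
      let nxt := frontier.foldl
        (fun nxt p =>
          if (memoGet memo p j).isSome then nxt
          else (p.toList.zip p.toList.tail).foldl
            (fun nxt lr =>
              let mid := rulesGet rules (String.ofList [lr.1, lr.2])
              if mid = "" then nxt
              else PySem.Set.add (PySem.Set.add nxt (String.ofList (lr.1 :: mid.toList)))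
                     (String.ofList (mid.toList ++ [lr.2]))) nxt)
        ([] : PySem.Set String)
      bDown rules memo fuel' (j - 1) nxt (acc ++ [(j, frontier)])
    else (frontier, acc)

-- upward pass: `vals = {p: _letter_counts(p) for p in frontier}` then
-- `for j, fr in reversed(frontiers): newvals[p] = memo hit or _expand_once(...)`
def bUp (rules : List (String × String)) (memo : List (String × Int × List (String × Int)))
    (levels : List (Int × List String)) (vals0 : PySem.Dict String (PySem.Dict String Int)) :
    PySem.Dict String (PySem.Dict String Int) :=
  levels.reverse.foldl
    (fun vals jfr =>
      jfr.2.foldl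
        (fun newvals p =>
          newvals.insert p
            (match memoGet memo p jfr.1 with
             | some h => PySem.Dict.mk h
             | none => bExpandOnce rules vals p.toList))
        PySem.Dict.empty)
    vals0

def insert_polymer_alt (polymer : String) (rules : List (String × String)) (count : Int)
    (memo : List (String × Int × List (String × Int))) : List (String × Int) :=
  if count = 0 then (letterCounts polymer.toList).items
  else
    match memoGet memo polymer count with
    | some h => h
    | none =>
      let down := bDown rules memo count.toNat count [polymer] []
      let vals0 := down.1.foldl (fun d p => d.insert p (letterCounts p.toList)) PySem.Dict.empty
      let vals := bUp rules memo down.2 vals0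
      -- Source B's `vals[polymer]`: the key is always present (level `count` is always recorded);
      -- getD's default is never used
      (vals.getD polymer PySem.Dict.empty).items

-- ===== PRECONDITION & SPEC =====
-- Pre_ excludes negative `count` (outside the natural domain: count is a number of expansion
-- steps), where A usually diverges by infinite recursion and only accidentally returns a
-- partially-expanded count when the rules or the memo cut the recursion off; the trivially
-- terminating negative-count shapes (a polymer with no adjacent pair, or a direct memo hit)
-- are kept inside.
def Pre_insert_polymer (polymer : String) (rules : List (String × String)) (count : Int)
    (memo : List (String × Int × List (String × Int))) : Prop :=
  0 ≤ count ∨ polymer.toList.length ≤ 1 ∨ memoGet memo polymer count ≠ none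
instance (polymer : String) (rules : List (String × String)) (count : Int) (memo : List (String × Int × List (String × Int))) : Decidable (Pre_insert_polymer polymer rules count memo) := by unfold Pre_insert_polymer; infer_instance

def pvWitness_insert_polymer : String × (List (String × String)) × Int × (List (String × Int × List (String × Int))) :=
  ("NNCB", [("NC", "B"), ("CB", "H")], 2, [("CB", (1, [("B", 1), ("C", 1)]))])

def Spec_insert_polymer (polymer : String) (rules : List (String × String)) (count : Int) (memo : List (String × Int × List (String × Int))) (out : List (String × Int)) : Prop := out = insert_polymer_alt polymer rules count memo
instance (polymer : String) (rules : List (String × String)) (count : Int) (memo : List (String × Int × List (String × Int))) (out : List (String × Int)) : Decidable (Spec_insert_polymer polymer rules count memo out) := by unfold Spec_insert_polymer; infer_instance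

-- ===== CLAIM (what is proved, stated in full; the proofs are below) =====
def Claim_equal_insert_polymer : Prop := ∀ (polymer : String) (rules : List (String × String)) (count : Int) (memo : List (String × Int × List (String × Int))), Dom_insert_polymer polymer rules count memo → Pre_insert_polymer polymer rules count memo → Spec_insert_polymer polymer rules count memo (insert_polymer polymer rules count memo)

-- ===== LEMMAS AND PROOFS =====

-- the pure one-level combining step shared by both characterizations: A's loop body with the
-- memo threading removed, the sub-results supplied by an abstract function `sub`
def pureStep (rules : List (String × String)) (sub : List Char → PySem.Dict String Int)
    (counts : PySem.Dict String Int) (lr : Char × Char) : PySem.Dict String Int :=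
  let mid := rulesGet rules (String.ofList [lr.1, lr.2])
  if mid = "" then
    mergeCounts ((PySem.Dict.empty).insert (String.ofList [lr.1]) 1
                   |>.insert (String.ofList [lr.2]) 1) counts
  else
    let counts := mergeCounts counts (mergeCounts (sub (lr.1 :: mid.toList)) (PySem.Dict.mk [(mid, -1)]))
    mergeCounts counts (mergeCounts (sub (mid.toList ++ [lr.2])) (PySem.Dict.mk [(String.ofList [lr.2], -1)]))

def combine (rules : List (String × String)) (sub : List Char → PySem.Dict String Int)
    (cs : List Char) : PySem.Dict String Int :=
  (cs.zip cs.tail).foldl (pureStep rules sub)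
    ((PySem.Dict.empty).insert (String.ofList (PySem.List.slice cs (some (-1)) none)) 1)

-- the VALUE both programs compute: level 0 is the plain letter count; at level j+1 an initial-memo
-- hit wins, otherwise one combining step over the level-j values
def V (rules : List (String × String)) (memo0 : List (String × Int × List (String × Int))) :
    Nat → List Char → PySem.Dict String Int
  | 0, cs => letterCounts cs
  | j + 1, cs =>
    match memoGet memo0 (String.ofList cs) ((j : Int) + 1) with
    | some v => PySem.Dict.mk v
    | none => combine rules (fun ds => V rules memo0 j ds) cs

lemma V_pos (rules : List (String × String)) (memo0 : List (String × Int × List (String × Int)))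
    (c : Int) (hc : 1 ≤ c) (cs : List Char) :
    V rules memo0 c.toNat cs =
      match memoGet memo0 (String.ofList cs) c with
      | some v => PySem.Dict.mk v
      | none => combine rules (fun ds => V rules memo0 (c - 1).toNat ds) cs := by
  rw [show c.toNat = (c - 1).toNat + 1 by omega]
  rw [V]
  rw [show (((c - 1).toNat : Int) + 1) = c by omega]

-- a running memo m is OK (relative to the initial memo0): it extends memo0's entries, and every
-- entry at a positive count carries the V-value of its key
def MemoOK (rules : List (String × String)) (memo0 m : List (String × Int × List (String × Int))) : Prop :=
  (∀ p c v, memoGet memo0 p c = some v → memoGet m p c = some v) ∧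
  (∀ (p : String) (c : Int) v, 1 ≤ c → memoGet m p c = some v →
     PySem.Dict.mk v = V rules memo0 c.toNat p.toList)

lemma memoOK_none {rules : List (String × String)} {memo0 m : List (String × Int × List (String × Int))}
    (h : MemoOK rules memo0 m) {p : String} {c : Int} (hn : memoGet m p c = none) :
    memoGet memo0 p c = none := by
  cases hm : memoGet memo0 p c with
  | none => rfl
  | some v => rw [h.1 p c v hm] at hn; cases hn

lemma memoOK_self (rules : List (String × String)) (memo0 : List (String × Int × List (String × Int))) :
    MemoOK rules memo0 memo0 := by
  refine ⟨fun _ _ _ h => h, fun p c v hc h => ?_⟩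
  rw [V_pos rules memo0 c hc]
  rw [String.ofList_toList, h]

lemma memoGet_append (l₁ l₂ : List (String × Int × List (String × Int))) (p : String) (c : Int) :
    memoGet (l₁ ++ l₂) p c = (memoGet l₁ p c).or (memoGet l₂ p c) := by
  induction l₁ with
  | nil => simp [memoGet]
  | cons e t ih =>
    simp only [List.cons_append, memoGet]
    split
    · rfl
    · exact ih

lemma memoOK_append {rules : List (String × String)} {memo0 m : List (String × Int × List (String × Int))}
    (h : MemoOK rules memo0 m) {p : String} {c : Int} {v : List (String × Int)} (hc : 1 ≤ c)
    (hv : PySem.Dict.mk v = V rules memo0 c.toNat p.toList) :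
    MemoOK rules memo0 (m ++ [(p, (c, v))]) := by
  constructor
  · intro q d w hq
    rw [memoGet_append, h.1 q d w hq, Option.some_or]
  · intro q d w hd hw
    rw [memoGet_append] at hw
    cases hm : memoGet m q d with
    | some u => rw [hm, Option.some_or] at hw; cases hw; exact h.2 q d w hd hm
    | none =>
      rw [hm, Option.none_or] at hw
      simp only [memoGet] at hw
      split at hw
      · rename_i hpc
        cases hw
        obtain ⟨h1, h2⟩ := hpc
        subst h1; subst h2
        exact hv
      · cases hw

-- ===== A's characterization: aGo computes V, preserving MemoOK =====

lemma aLoop_eq (rules : List (String × String)) (memo0 : List (String × Int × List (String × Int)))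
    (fuel : Nat)
    (IH : ∀ (cs : List Char) (count : Int) m, 0 ≤ count → count.toNat ≤ fuel → MemoOK rules memo0 m →
        (aGo rules fuel cs count m).1 = V rules memo0 count.toNat cs ∧
        MemoOK rules memo0 (aGo rules fuel cs count m).2) :
    ∀ (pairs : List (Char × Char)) (count : Int) (counts : PySem.Dict String Int)
      (m : List (String × Int × List (String × Int))),
      1 ≤ count → (count - 1).toNat ≤ fuel → MemoOK rules memo0 m →
      (aLoop rules fuel count pairs counts m).1 =
        pairs.foldl (pureStep rules (fun ds => V rules memo0 (count - 1).toNat ds)) counts ∧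
      MemoOK rules memo0 (aLoop rules fuel count pairs counts m).2 := by
  intro pairs
  induction pairs with
  | nil => intro count counts m _ _ hm; rw [aLoop]; exact ⟨rfl, hm⟩
  | cons lr rest ih =>
    intro count counts m hc hf hm
    rw [aLoop]
    simp only []
    by_cases hmid : rulesGet rules (String.ofList [lr.1, lr.2]) = ""
    · rw [if_pos hmid]
      rw [List.foldl_cons, pureStep, if_pos hmid]
      exact ih count _ m hc hf hm
    · rw [if_neg hmid]
      have hc1 : (0:Int) ≤ count - 1 := by omega
      obtain ⟨hsl, hmsl⟩ := IH (lr.1 :: (rulesGet rules (String.ofList [lr.1, lr.2])).toList)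
        (count - 1) m hc1 hf hm
      obtain ⟨hsr, hmsr⟩ := IH ((rulesGet rules (String.ofList [lr.1, lr.2])).toList ++ [lr.2])
        (count - 1) _ hc1 hf hmsl
      rw [List.foldl_cons, pureStep, if_neg hmid]
      simp only []
      rw [hsl, hsr]
      exact ih count _ _ hc hf hmsr

lemma aGo_eq (rules : List (String × String)) (memo0 : List (String × Int × List (String × Int))) :
    ∀ (fuel : Nat) (cs : List Char) (count : Int) (m : List (String × Int × List (String × Int))),
      0 ≤ count → count.toNat ≤ fuel → MemoOK rules memo0 m →
      (aGo rules fuel cs count m).1 = V rules memo0 count.toNat cs ∧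
      MemoOK rules memo0 (aGo rules fuel cs count m).2 := by
  intro fuel
  induction fuel with
  | zero =>
    intro cs count m h0 hf hm
    rw [aGo]
    by_cases hz : count = 0
    · subst hz
      rw [if_pos rfl]
      exact ⟨rfl, hm⟩
    · rw [if_neg hz]
      cases hv : memoGet m (String.ofList cs) count with
      | some v =>
        have := hm.2 (String.ofList cs) count v (by omega) hv
        rw [String.toList_ofList] at this
        exact ⟨by simp only []; exact this, hm⟩
      | none => omega
  | succ fuel ihf =>
    intro cs count m h0 hf hm
    rw [aGo]
    by_cases hz : count = 0
    · subst hz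
      rw [if_pos rfl]
      exact ⟨rfl, hm⟩
    · rw [if_neg hz]
      cases hv : memoGet m (String.ofList cs) count with
      | some v =>
        have := hm.2 (String.ofList cs) count v (by omega) hv
        rw [String.toList_ofList] at this
        exact ⟨by simp only []; exact this, hm⟩
      | none =>
        simp only []
        have hc1 : (1:Int) ≤ count := by omega
        have hf1 : (count - 1).toNat ≤ fuel := by omega
        obtain ⟨hst, hmst⟩ := aLoop_eq rules memo0 fuel ihf (cs.zip cs.tail) count
          ((PySem.Dict.empty).insert (String.ofList (PySem.List.slice cs (some (-1)) none)) 1)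
          m hc1 hf1 hm
        have hV : V rules memo0 count.toNat cs =
            combine rules (fun ds => V rules memo0 (count - 1).toNat ds) cs := by
          rw [V_pos rules memo0 count hc1 cs, memoOK_none hm hv]
        have h1 : (aLoop rules fuel count (cs.zip cs.tail)
            ((PySem.Dict.empty).insert (String.ofList (PySem.List.slice cs (some (-1)) none)) 1) m).1 =
            V rules memo0 count.toNat cs := by
          rw [hst, hV, combine]
        refine ⟨h1, ?_⟩
        exact memoOK_append hmst hc1 (by rw [show PySem.Dict.mk (aLoop rules fuel count (cs.zip cs.tail) ((PySem.Dict.empty).insert (String.ofList (PySem.List.slice cs (some (-1)) none)) 1) m).1.items = (aLoop rules fuel count (cs.zip cs.tail) ((PySem.Dict.empty).insert (String.ofList (PySem.List.slice cs (some (-1)) none)) 1) m).1 from rfl, h1, String.toList_ofList])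

lemma insert_polymer_eq_V (polymer : String) (rules : List (String × String)) (count : Int)
    (memo : List (String × Int × List (String × Int))) (h0 : 0 ≤ count) :
    insert_polymer polymer rules count memo = (V rules memo count.toNat polymer.toList).items := by
  rw [insert_polymer,
    (aGo_eq rules memo count.toNat polymer.toList count memo h0 le_rfl (memoOK_self rules memo)).1]

-- ===== B's characterization =====

-- proof-only names for the two fold steps inside bDown (definitionally equal to the inline lambdas)
def innerStep (rules : List (String × String)) (nxt : PySem.Set String) (lr : Char × Char) :
    PySem.Set String :=
  if rulesGet rules (String.ofList [lr.1, lr.2]) = "" then nxt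
  else PySem.Set.add
         (PySem.Set.add nxt (String.ofList (lr.1 :: (rulesGet rules (String.ofList [lr.1, lr.2])).toList)))
         (String.ofList ((rulesGet rules (String.ofList [lr.1, lr.2])).toList ++ [lr.2]))

def outerStep (rules : List (String × String)) (memo : List (String × Int × List (String × Int)))
    (j : Int) : PySem.Set String → String → PySem.Set String :=
  fun nxt p =>
    if (memoGet memo p j).isSome then nxt
    else (p.toList.zip p.toList.tail).foldl (innerStep rules) nxt

-- the children a non-memoized string needs from the level below
def childrenPl (rules : List (String × String)) (pl : List (Char × Char)) : List String :=
  pl.flatMap (fun lr =>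
    if rulesGet rules (String.ofList [lr.1, lr.2]) = "" then []
    else [String.ofList (lr.1 :: (rulesGet rules (String.ofList [lr.1, lr.2])).toList),
          String.ofList ((rulesGet rules (String.ofList [lr.1, lr.2])).toList ++ [lr.2])])

lemma mem_inner_fold_of_mem (rules : List (String × String)) (pl : List (Char × Char))
    (s : PySem.Set String) {x : String} (hx : x ∈ s) :
    x ∈ pl.foldl (innerStep rules) s := by
  induction pl generalizing s with
  | nil => exact hx
  | cons lr rest ih =>
    rw [List.foldl_cons]
    apply ih
    rw [innerStep]
    split
    · exact hx
    · rw [PySem.Set.mem_add, PySem.Set.mem_add]; left; left; exact hx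

lemma children_mem_inner_fold (rules : List (String × String)) (pl : List (Char × Char))
    (s : PySem.Set String) {q : String} (hq : q ∈ childrenPl rules pl) :
    q ∈ pl.foldl (innerStep rules) s := by
  induction pl generalizing s with
  | nil => simp [childrenPl] at hq
  | cons lr rest ih =>
    rw [childrenPl, List.flatMap_cons] at hq
    rw [List.foldl_cons]
    rw [List.mem_append] at hq
    rw [innerStep]
    by_cases hmid : rulesGet rules (String.ofList [lr.1, lr.2]) = ""
    · rw [if_pos hmid] at hq ⊢
      rcases hq with hq | hq
      · cases hq
      · exact ih _ hq
    · rw [if_neg hmid] at hq ⊢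
      rcases hq with hq | hq
      · apply mem_inner_fold_of_mem
        simp only [List.mem_cons, List.not_mem_nil, or_false] at hq
        rw [PySem.Set.mem_add, PySem.Set.mem_add]
        rcases hq with hq | hq
        · left; right; exact hq
        · right; exact hq
      · exact ih _ hq

lemma mem_outer_fold_of_mem (rules : List (String × String))
    (memo : List (String × Int × List (String × Int))) (j : Int) (fr : List String)
    (s : PySem.Set String) {x : String} (hx : x ∈ s) :
    x ∈ fr.foldl (outerStep rules memo j) s := by
  induction fr generalizing s with
  | nil => exact hx
  | cons p rest ih =>
    rw [List.foldl_cons]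
    apply ih
    rw [outerStep]
    split
    · exact hx
    · exact mem_inner_fold_of_mem rules _ _ hx

lemma mem_nxt (rules : List (String × String)) (memo : List (String × Int × List (String × Int)))
    (j : Int) (fr : List String) (s : PySem.Set String) {p q : String}
    (hp : p ∈ fr) (hmiss : memoGet memo p j = none)
    (hq : q ∈ childrenPl rules (p.toList.zip p.toList.tail)) :
    q ∈ fr.foldl (outerStep rules memo j) s := by
  induction fr generalizing s with
  | nil => cases hp
  | cons x rest ih =>
    rw [List.foldl_cons]
    rcases List.mem_cons.mp hp with hx | hx
    · subst hx
      apply mem_outer_fold_of_mem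
      rw [outerStep]
      simp only [hmiss, Option.isSome_none, Bool.false_eq_true, if_false]
      exact children_mem_inner_fold rules _ s hq
    · exact ih _ hx

-- the chain of levels recorded by bDown: level j's frontier, then the chain from the computed
-- next frontier at level j - 1; the final component is the frontier left when the loop stops
def Chain (rules : List (String × String)) (memo : List (String × Int × List (String × Int))) :
    Int → List String → List (Int × List String) → List String → Prop
  | j, fr, [], fr0 => ¬(j > 0 ∧ fr ≠ []) ∧ fr0 = fr
  | j, fr, jf :: rest, fr0 =>
    jf.1 = j ∧ jf.2 = fr ∧ (j > 0 ∧ fr ≠ []) ∧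
    Chain rules memo (j - 1) (fr.foldl (outerStep rules memo j) []) rest fr0

lemma bDown_chain (rules : List (String × String)) (memo : List (String × Int × List (String × Int))) :
    ∀ (fuel : Nat) (j : Int) (fr : List String) (acc : List (Int × List String)),
      j ≤ (fuel : Int) →
      ∃ L fr0, bDown rules memo fuel j fr acc = (fr0, acc ++ L) ∧ Chain rules memo j fr L fr0 := by
  intro fuel
  induction fuel with
  | zero =>
    intro j fr acc hj
    refine ⟨[], fr, ?_, ?_, rfl⟩
    · rw [bDown]; simp
    · intro h; omega
  | succ fuel ih =>
    intro j fr acc hj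
    rw [bDown]
    by_cases hc : j > 0 ∧ fr ≠ []
    · rw [if_pos hc]
      obtain ⟨L, fr0, hd, hch⟩ := ih (j - 1) (fr.foldl (outerStep rules memo j) []) (acc ++ [(j, fr)]) (by omega)
      refine ⟨(j, fr) :: L, fr0, ?_, rfl, rfl, hc, hch⟩
      rw [show fr.foldl (fun nxt p => if (memoGet memo p j).isSome then nxt
            else (p.toList.zip p.toList.tail).foldl
              (fun nxt lr =>
                let mid := rulesGet rules (String.ofList [lr.1, lr.2])
                if mid = "" then nxt
                else PySem.Set.add (PySem.Set.add nxt (String.ofList (lr.1 :: mid.toList)))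
                       (String.ofList (mid.toList ++ [lr.2]))) nxt) [] =
            fr.foldl (outerStep rules memo j) [] from rfl]
      rw [hd, List.append_assoc]
      rfl
    · rw [if_neg hc]
      exact ⟨[], fr, by simp, hc, rfl⟩

lemma chain_bottom (rules : List (String × String)) (memo : List (String × Int × List (String × Int))) :
    ∀ (L : List (Int × List String)) (j : Int) (fr fr0 : List String),
      Chain rules memo j fr L fr0 → fr0 = [] ∨ j - L.length ≤ 0 := by
  intro L
  induction L with
  | nil =>
    intro j fr fr0 hch
    obtain ⟨h1, h2⟩ := hch
    by_cases hj : j > 0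
    · left
      subst h2
      by_contra hne
      exact h1 ⟨hj, hne⟩
    · right; simpa using by omega
  | cons jf rest ih =>
    intro j fr fr0 hch
    obtain ⟨-, -, -, hch⟩ := hch
    rcases ih (j - 1) _ fr0 hch with h | h
    · left; exact h
    · right; simp only [List.length_cons]; omega

-- getD after a comprehension-style fold of inserts
lemma getD_foldl_insert_of_not_mem (fr : List String)
    (g : String → PySem.Dict String Int) (d0 : PySem.Dict String (PySem.Dict String Int))
    {p : String} (hp : p ∉ fr) :
    (fr.foldl (fun d x => d.insert x (g x)) d0).getD p PySem.Dict.empty = d0.getD p PySem.Dict.empty := by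
  induction fr generalizing d0 with
  | nil => rfl
  | cons x rest ih =>
    rw [List.foldl_cons]
    rw [ih _ (fun h => hp (List.mem_cons.mpr (Or.inr h)))]
    rw [PySem.Dict.getD_insert]
    rw [if_neg (fun h => hp (List.mem_cons.mpr (Or.inl h)))]

lemma getD_foldl_insert_self (fr : List String)
    (g : String → PySem.Dict String Int) (d0 : PySem.Dict String (PySem.Dict String Int))
    {p : String} (hp : p ∈ fr) :
    (fr.foldl (fun d x => d.insert x (g x)) d0).getD p PySem.Dict.empty = g p := by
  induction fr generalizing d0 with
  | nil => cases hp
  | cons x rest ih =>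
    rw [List.foldl_cons]
    by_cases hr : p ∈ rest
    · exact ih _ hr
    · rcases List.mem_cons.mp hp with hx | hx
      · subst hx
        rw [getD_foldl_insert_of_not_mem rest g _ hr]
        rw [PySem.Dict.getD_insert, if_pos rfl]
      · exact absurd hx hr

-- one level of B's expansion equals the pure combine, when vals carries the level-below V values
lemma bExpandOnce_eq (rules : List (String × String))
    (memo0 : List (String × Int × List (String × Int)))
    (vals : PySem.Dict String (PySem.Dict String Int)) (cs : List Char) (lvl : Nat)
    (hv : ∀ q ∈ childrenPl rules (cs.zip cs.tail),
        vals.getD q PySem.Dict.empty = V rules memo0 lvl q.toList) :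
    bExpandOnce rules vals cs = combine rules (fun ds => V rules memo0 lvl ds) cs := by
  rw [bExpandOnce, combine]
  apply PySem.List.foldl_congr_mem
  intro acc lr hlr
  rw [pureStep]
  simp only []
  by_cases hmid : rulesGet rules (String.ofList [lr.1, lr.2]) = ""
  · rw [if_pos hmid, if_pos hmid]
  · rw [if_neg hmid, if_neg hmid]
    have hl : String.ofList (lr.1 :: (rulesGet rules (String.ofList [lr.1, lr.2])).toList)
        ∈ childrenPl rules (cs.zip cs.tail) := by
      rw [childrenPl, List.mem_flatMap]
      exact ⟨lr, hlr, by rw [if_neg hmid]; simp⟩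
    have hr : String.ofList ((rulesGet rules (String.ofList [lr.1, lr.2])).toList ++ [lr.2])
        ∈ childrenPl rules (cs.zip cs.tail) := by
      rw [childrenPl, List.mem_flatMap]
      exact ⟨lr, hlr, by rw [if_neg hmid]; simp⟩
    rw [hv _ hl, hv _ hr, String.toList_ofList, String.toList_ofList]

-- the upward pass: processing a whole chain yields the V values at its top level
lemma bUp_ok (rules : List (String × String)) (memo : List (String × Int × List (String × Int))) :
    ∀ (L : List (Int × List String)) (j : Int) (fr fr0 : List String)
      (vals0 : PySem.Dict String (PySem.Dict String Int)),
      Chain rules memo j fr L fr0 →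
      (∀ p ∈ fr0, vals0.getD p PySem.Dict.empty = V rules memo (j - L.length).toNat p.toList) →
      ∀ p ∈ fr, (bUp rules memo L vals0).getD p PySem.Dict.empty = V rules memo j.toNat p.toList := by
  intro L
  induction L with
  | nil =>
    intro j fr fr0 vals0 hch h0 p hp
    obtain ⟨-, h2⟩ := hch
    subst h2
    have := h0 p hp
    simpa using this
  | cons jf rest ih =>
    intro j fr fr0 vals0 hch h0 p hp
    obtain ⟨he1, he2, ⟨hj, -⟩, hch⟩ := hch
    -- bUp on (jf :: rest) processes rest first (levels are reversed), then jf
    have hstep : bUp rules memo (jf :: rest) vals0 =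
        jf.2.foldl
          (fun newvals p =>
            newvals.insert p
              (match memoGet memo p jf.1 with
               | some h => PySem.Dict.mk h
               | none => bExpandOnce rules (bUp rules memo rest vals0) p.toList))
          PySem.Dict.empty := by
      rw [bUp, bUp, List.reverse_cons, List.foldl_append, List.foldl_cons, List.foldl_nil]
    have hrest : ∀ q ∈ fr.foldl (outerStep rules memo j) [],
        (bUp rules memo rest vals0).getD q PySem.Dict.empty =
          V rules memo (j - 1).toNat q.toList := by
      intro q hq
      have := ih (j - 1) _ fr0 vals0 hch (by
        intro r hr
        have := h0 r hr
        rw [show j - ((jf :: rest).length : Int) = j - 1 - (rest.length : Int) by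
          simp [List.length_cons]; ring] at this
        exact this) q hq
      exact this
    subst he1 he2
    rw [hstep]
    rw [getD_foldl_insert_self _ _ _ hp]
    cases hhit : memoGet memo p jf.1 with
    | some h =>
      have := (memoOK_self rules memo).2 p jf.1 h (by omega) hhit
      simp only []
      exact this
    | none =>
      simp only []
      have hV : V rules memo jf.1.toNat p.toList =
          combine rules (fun ds => V rules memo (jf.1 - 1).toNat ds) p.toList := by
        rw [V_pos rules memo jf.1 (by omega) p.toList, String.ofList_toList, hhit]
      rw [hV]
      apply bExpandOnce_eq
      intro q hq
      exact hrest q (mem_nxt rules memo jf.1 jf.2 [] hp hhit hq)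

lemma insert_polymer_alt_eq_V (polymer : String) (rules : List (String × String)) (count : Int)
    (memo : List (String × Int × List (String × Int))) (h0 : 0 ≤ count) :
    insert_polymer_alt polymer rules count memo = (V rules memo count.toNat polymer.toList).items := by
  rw [insert_polymer_alt]
  by_cases hz : count = 0
  · subst hz
    rw [if_pos rfl]
    rfl
  · rw [if_neg hz]
    cases hv : memoGet memo polymer count with
    | some v =>
      have := (memoOK_self rules memo).2 polymer count v (by omega) hv
      simp only []
      rw [← this]
    | none =>
      simp only []
      obtain ⟨L, fr0, hd, hch⟩ := bDown_chain rules memo count.toNat count [polymer] [] (by omega)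
      rw [show (bDown rules memo count.toNat count [polymer] []) = (fr0, [] ++ L) from hd]
      simp only [List.nil_append]
      have hvals0 : ∀ p ∈ fr0,
          (fr0.foldl (fun d p => d.insert p (letterCounts p.toList)) PySem.Dict.empty).getD p
              PySem.Dict.empty = V rules memo (count - L.length).toNat p.toList := by
        intro p hp
        rcases chain_bottom rules memo L count [polymer] fr0 hch with h | h
        · subst h; cases hp
        · rw [show (count - (L.length : Int)).toNat = 0 by omega]
          rw [getD_foldl_insert_self _ _ _ hp]
          rfl
      have := bUp_ok rules memo L count [polymer] fr0
        (fr0.foldl (fun d p => d.insert p (letterCounts p.toList)) PySem.Dict.empty) hch hvals0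
        polymer (List.mem_singleton.mpr rfl)
      rw [this]

-- negative count, but no adjacent pair or a direct memo hit: A terminates at once and agrees with B
lemma neg_trivial_eq (polymer : String) (rules : List (String × String)) (count : Int)
    (memo : List (String × Int × List (String × Int))) (hneg : count < 0)
    (htriv : polymer.toList.length ≤ 1 ∨ memoGet memo polymer count ≠ none) :
    insert_polymer polymer rules count memo = insert_polymer_alt polymer rules count memo := by
  have hz : ¬(count = 0) := by omega
  have hf : count.toNat = 0 := by omega
  rw [insert_polymer, insert_polymer_alt, hf, aGo, if_neg hz, if_neg hz, String.ofList_toList]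
  cases hv : memoGet memo polymer count with
  | some v => simp only []
  | none =>
    rcases htriv with hlen | hhit
    · simp only []
      rw [bDown]
      simp only [List.foldl_cons, List.foldl_nil, bUp, List.reverse_nil]
      rw [PySem.Dict.getD_insert, if_pos rfl]
      match polymer.toList, hlen with
      | [], _ => rfl
      | [c], _ => rfl
    · exact absurd hv hhit

-- ===== VERDICT (by name: the statement is the Claim_ definition above) =====
theorem insert_polymer_spec : Claim_equal_insert_polymer := by
  intro polymer rules count memo _ hpre
  unfold Spec_insert_polymer
  by_cases h0 : 0 ≤ count
  · rw [insert_polymer_eq_V polymer rules count memo h0,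
      insert_polymer_alt_eq_V polymer rules count memo h0]
  · rcases hpre with hpre | hpre
    · exact absurd hpre h0
    · exact neg_trivial_eq polymer rules count memo (by omega) hpre
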